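-- pv_equiv track=rewrite | github.com/FushengTianQing/ZhC | tests/benchmarks/test_dominator_performance.py | generate_linear_chain
-- ===== SOURCE A (Python) =====
-- def generate_linear_chain(num_blocks: int) -> dict:
--     """生成线性链控制流图"""
--     blocks = {}
--     labels = [f"b{i}" for i in range(num_blocks)]
--
--     for i, label in enumerate(labels):
--         if i == 0:
--             blocks[label] = ([], [labels[1]] if i + 1 < len(labels) else [])
--         elif i == len(labels) - 1:
--             blocks[label] = ([labels[i - 1]], [])
--         else:
--             blocks[label] = ([labels[i - 1]], [labels[i + 1]])
--
--     return blocks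
-- ===== SOURCE B (Python) =====
-- def generate_linear_chain(num_blocks: int) -> dict:
--     """生成线性链控制流图"""
--     labels = [f"b{i}" for i in range(num_blocks)]
--     preds = [[]] + [[l] for l in labels[:-1]]
--     succs = [[l] for l in labels[1:]] + [[]]
--     return dict(zip(labels, zip(preds, succs)))
-- ===== Notes on version B (the rewrite author's own statement) =====
-- stated objective: simpler
-- what changed: Replaces A's per-node loop with a three-way index branch by building the shifted predecessor/successor lists once (labels[:-1] / labels[1:]) and zipping them with the labels into the dict.
import Mathlib
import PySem

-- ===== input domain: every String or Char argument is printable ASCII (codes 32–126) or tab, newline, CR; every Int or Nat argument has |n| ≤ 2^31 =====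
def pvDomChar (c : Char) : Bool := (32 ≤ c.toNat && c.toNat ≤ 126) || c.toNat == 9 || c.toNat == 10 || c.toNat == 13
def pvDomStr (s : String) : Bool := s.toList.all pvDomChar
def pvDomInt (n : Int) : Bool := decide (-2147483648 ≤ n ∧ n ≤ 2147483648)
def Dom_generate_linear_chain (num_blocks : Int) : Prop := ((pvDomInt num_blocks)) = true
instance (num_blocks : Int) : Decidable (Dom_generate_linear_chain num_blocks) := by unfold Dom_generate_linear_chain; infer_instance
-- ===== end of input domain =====

-- B replaces A's per-node three-way branch by building shifted predecessor/successor
-- lists once and zipping them with the labels (objective: simpler).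

-- ===== PORT A =====
-- labels[1], labels[i-1], labels[i+1] are guarded in range in A, so pyGetD is exact here.
def generate_linear_chain (num_blocks : Int) : List (String × List String × List String) :=
  let labels : List String :=
    (PySem.List.pyRange 0 num_blocks 1).map (fun i => "b" ++ PySem.Int.toStr i)
  let blocks : PySem.Dict String (List String × List String) :=
    (PySem.List.enumerate labels 0).foldl (fun blocks p =>
      let i := p.1
      let label := p.2
      if i = 0 then
        blocks.insert label
          (([] : List String),
           if i + 1 < (labels.length : Int) then [PySem.List.pyGetD labels 1 ""] else [])
      else if i = (labels.length : Int) - 1 then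
        blocks.insert label ([PySem.List.pyGetD labels (i - 1) ""], ([] : List String))
      else
        blocks.insert label
          ([PySem.List.pyGetD labels (i - 1) ""], [PySem.List.pyGetD labels (i + 1) ""]))
      PySem.Dict.empty
  blocks.items

-- ===== PORT B =====
def generate_linear_chain_alt (num_blocks : Int) : List (String × List String × List String) :=
  let labels : List String :=
    (PySem.List.pyRange 0 num_blocks 1).map (fun i => "b" ++ PySem.Int.toStr i)
  let preds : List (List String) :=
    [([] : List String)] ++ (PySem.List.slice labels none (some (-1))).map (fun l => [l])
  let succs : List (List String) :=
    (PySem.List.slice labels (some 1) none).map (fun l => [l]) ++ [([] : List String)]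
  (PySem.Dict.ofList (labels.zip (preds.zip succs))).items

-- ===== PRECONDITION & SPEC =====
def Spec_generate_linear_chain (num_blocks : Int) (out : List (String × List String × List String)) : Prop := out = generate_linear_chain_alt num_blocks
instance (num_blocks : Int) (out : List (String × List String × List String)) : Decidable (Spec_generate_linear_chain num_blocks out) := by unfold Spec_generate_linear_chain; infer_instance

-- ===== CLAIM (what is proved, stated in full; the proofs are below) =====
def Claim_equal_generate_linear_chain : Prop := ∀ (num_blocks : Int), Dom_generate_linear_chain num_blocks → Spec_generate_linear_chain num_blocks (generate_linear_chain num_blocks)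

-- ===== LEMMAS AND PROOFS =====

theorem enumerate_getElem? {α : Type} (xs : List α) (s : Int) (k : Nat) (h : k < xs.length) :
    (PySem.List.enumerate xs s)[k]? = some (s + k, xs[k]) := by
  induction xs generalizing s k with
  | nil => simp at h
  | cons x xs ih =>
    rw [PySem.List.enumerate_cons]
    cases k with
    | zero => simp
    | succ k =>
      simp only [List.getElem?_cons_succ, List.getElem_cons_succ]
      rw [ih (s + 1) k (by simpa using h)]
      congr 2
      push_cast
      ring

-- The key fact: A's per-node entries, read off enumerate(labels), are exactly B's
-- zip of labels with the shifted pred/succ lists.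
theorem pairs_eq (labels : List String) :
    (PySem.List.enumerate labels 0).map (fun p =>
      (p.2,
        if p.1 = 0 then
          (([] : List String),
           if p.1 + 1 < (labels.length : Int) then [PySem.List.pyGetD labels 1 ""] else [])
        else if p.1 = (labels.length : Int) - 1 then
          ([PySem.List.pyGetD labels (p.1 - 1) ""], ([] : List String))
        else
          ([PySem.List.pyGetD labels (p.1 - 1) ""], [PySem.List.pyGetD labels (p.1 + 1) ""])))
    = labels.zip
        ((([([] : List String)] ++ labels.dropLast.map (fun l => [l])).zip
          (labels.tail.map (fun l => [l]) ++ [([] : List String)])) ) := by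
  have hlen : ∀ {α : Type} (xs : List α), (PySem.List.enumerate xs 0).length = xs.length :=
    fun xs => PySem.List.length_enumerate xs 0
  apply List.ext_getElem
  · simp only [List.length_map, hlen, List.length_zip, List.length_append,
      List.length_dropLast, List.length_tail, List.length_singleton]
    omega
  intro k h1 h2
  have hk : k < labels.length := by simpa [hlen] using h1
  -- left side
  have hL : ∀ hh, (PySem.List.enumerate labels 0)[k]'hh = ((k : Int), labels[k]) := by
    intro hh
    have := enumerate_getElem? labels 0 k hk
    simpa [List.getElem?_eq_getElem hh] using this
  rw [List.getElem_map, hL, List.getElem_zip, List.getElem_zip]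
  simp only
  -- index bounds for the shifted lists
  have hplen : ([([] : List String)] ++ labels.dropLast.map (fun l => [l])).length
      = labels.length := by simp [List.length_dropLast]; omega
  have hslen : (labels.tail.map (fun l => [l]) ++ [([] : List String)]).length
      = labels.length := by simp [List.length_tail]; omega
  have hpred : ∀ hh, (([([] : List String)] ++ labels.dropLast.map (fun l => [l]))[k]'hh)
      = if k = 0 then ([] : List String) else [labels.getD (k - 1) ""] := by
    intro hh
    rcases k with _ | j
    · simp
    · have hj : j < labels.dropLast.length := by simp [List.length_dropLast]; omega
      rw [List.getElem_append_right (by simp : ([([] : List String)]).length ≤ j + 1)]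
      simp [List.getElem_dropLast,
        List.getElem?_eq_getElem (show j < labels.length by omega)]
  have hsucc : ∀ hh, ((labels.tail.map (fun l => [l]) ++ [([] : List String)])[k]'hh)
      = if k + 1 < labels.length then [labels.getD (k + 1) ""] else ([] : List String) := by
    intro hh
    by_cases hlast : k + 1 < labels.length
    · have hj : k < (labels.tail.map (fun l => [l])).length := by
        simp [List.length_tail]; omega
      rw [List.getElem_append_left hj]
      simp [hlast, List.getElem_tail]
    · have hj : (labels.tail.map (fun l => [l])).length ≤ k := by
        simp [List.length_tail]; omega
      rw [List.getElem_append_right hj]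
      simp [hlast]
  rw [hpred, hsucc]
  -- match A's three branches against the shifted-list entries
  by_cases h0 : k = 0
  · subst h0
    by_cases h1n : 1 < labels.length
    · simp [h1n, pysem]
    · simp [h1n]
  · have hki : ((k : Int)) ≠ 0 := by exact_mod_cast h0
    have hmm : ((k : Int)) - 1 = ((k - 1 : Nat) : Int) := by omega
    by_cases hlast : k = labels.length - 1
    · have hlasti : ((k : Int)) = (labels.length : Int) - 1 := by omega
      have hnot : ¬ k + 1 < labels.length := by omega
      rw [if_neg hki, if_pos hlasti, if_neg h0, if_neg hnot, hmm]
      simp [PySem.List.pyGetD_natCast]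
    · have hlasti : ((k : Int)) ≠ (labels.length : Int) - 1 := by omega
      have hyes : k + 1 < labels.length := by omega
      have hpp : ((k : Int)) + 1 = ((k + 1 : Nat) : Int) := by omega
      rw [if_neg hki, if_neg hlasti, if_neg h0, if_pos hyes, hmm, hpp]
      simp only [PySem.List.pyGetD_natCast, List.getD_eq_getElem?_getD]

theorem dict_ofList_eq_foldl {κ ν : Type} [BEq κ] (ps : List (κ × ν)) :
    PySem.Dict.ofList ps = ps.foldl (fun d p => d.insert p.1 p.2) PySem.Dict.empty := rfl

theorem ports_eq (num_blocks : Int) :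
    generate_linear_chain num_blocks = generate_linear_chain_alt num_blocks := by
  unfold generate_linear_chain generate_linear_chain_alt
  simp only [PySem.List.slice_to_neg_one, PySem.List.slice_from_one]
  generalize (PySem.List.pyRange 0 num_blocks 1).map (fun i => "b" ++ PySem.Int.toStr i) = labels
  rw [dict_ofList_eq_foldl, ← pairs_eq labels, List.foldl_map]
  congr 1
  refine congrFun (congrFun (congrArg List.foldl ?_) _) _
  funext d p
  by_cases h0 : p.1 = 0
  · rw [if_pos h0, if_pos h0]
  · by_cases hl : p.1 = (labels.length : Int) - 1
    · rw [if_neg h0, if_neg h0, if_pos hl, if_pos hl]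
    · rw [if_neg h0, if_neg h0, if_neg hl, if_neg hl]

-- ===== VERDICT (by name: the statement is the Claim_ definition above) =====
theorem generate_linear_chain_spec : Claim_equal_generate_linear_chain := by
  intro n _
  exact ports_eq n
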